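-- pv_equiv track=rewrite | github.com/mlevitan96-crypto/stock-bot | scripts/telemetry/alpaca_ml_interaction_expand.py | _resolve_macro_columns
-- ===== SOURCE A (Python) =====
-- from typing import Any, Dict, List, Sequence, Tuple
--
-- def _resolve_macro_columns(headers: Sequence[str]) -> List[Tuple[str, str]]:
--     """Returns list of (logical_name, header) for each macro column to interact."""
--     hset = list(headers)
--     found: List[Tuple[str, str]] = []
--
--     if "mlf_scoreflow_total_score" in hset:
--         found.append(("mlf_scoreflow_total_score", "mlf_scoreflow_total_score"))
--
--     for h in hset:
--         if "vxx_vxz_ratio" in h: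
--             found.append(("vxx_vxz_ratio", h))
--             break
--
--     for h in hset:
--         if "futures_direction_delta" in h:
--             found.append(("futures_direction_delta", h))
--             break
--
--     return found
-- ===== SOURCE B (Python) =====
-- def _resolve_macro_columns(headers):
--     """One pass over headers accumulating state, then build the result in fixed order."""
--     exact = False
--     vxx = None
--     fut = None
--     for h in headers:
--         if h == "mlf_scoreflow_total_score":
--             exact = True
--         if vxx is None and "vxx_vxz_ratio" in h:
--             vxx = h
--         if fut is None and "futures_direction_delta" in h:
--             fut = h
--     out = []
--     if exact:
--         out.append(("mlf_scoreflow_total_score", "mlf_scoreflow_total_score"))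
--     if vxx is not None:
--         out.append(("vxx_vxz_ratio", vxx))
--     if fut is not None:
--         out.append(("futures_direction_delta", fut))
--     return out
-- ===== Notes on version B (the rewrite author's own statement) =====
-- stated objective: alternative
-- what changed: Replaces A's three separate scans (a membership test plus two break-on-first-match loops) with a single traversal that accumulates a flag and two first-match Optionals, assembling the output afterwards in the fixed logical order.
import Mathlib
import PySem

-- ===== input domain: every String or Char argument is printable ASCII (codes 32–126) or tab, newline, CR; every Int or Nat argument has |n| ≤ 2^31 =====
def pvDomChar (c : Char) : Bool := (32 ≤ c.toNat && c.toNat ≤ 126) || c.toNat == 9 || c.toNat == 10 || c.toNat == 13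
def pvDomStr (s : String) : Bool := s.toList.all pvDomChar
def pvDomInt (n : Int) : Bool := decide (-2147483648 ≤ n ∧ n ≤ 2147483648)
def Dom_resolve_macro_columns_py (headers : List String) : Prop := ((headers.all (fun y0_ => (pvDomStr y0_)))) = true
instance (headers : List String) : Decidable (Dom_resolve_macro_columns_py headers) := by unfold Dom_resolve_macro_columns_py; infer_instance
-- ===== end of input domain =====

-- B replaces A's three separate scans with one pass accumulating a flag and two
-- first-match options, then builds the result in fixed logical order (alternative, same cost).


-- ===== PORT A =====
-- first `for h in hset: if "vxx_vxz_ratio" in h: append; break`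
def pvAloopVxx : List String → List (String × String)
  | [] => []
  | h :: t =>
    if PySem.Str.isIn "vxx_vxz_ratio" h then [("vxx_vxz_ratio", h)]
    else pvAloopVxx t

-- second `for h in hset: if "futures_direction_delta" in h: append; break`
def pvAloopFut : List String → List (String × String)
  | [] => []
  | h :: t =>
    if PySem.Str.isIn "futures_direction_delta" h then [("futures_direction_delta", h)]
    else pvAloopFut t

def resolve_macro_columns_py (headers : List String) : List (String × String) :=
  (if headers.contains "mlf_scoreflow_total_score" then
      [("mlf_scoreflow_total_score", "mlf_scoreflow_total_score")]
    else [])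
  ++ pvAloopVxx headers ++ pvAloopFut headers

-- ===== PORT B =====
-- one loop step updating (exact-flag, first vxx match, first futures match)
def pvBstep (st : Bool × Option String × Option String) (h : String) :
    Bool × Option String × Option String :=
  (st.1 || h == "mlf_scoreflow_total_score",
   if st.2.1.isNone && PySem.Str.isIn "vxx_vxz_ratio" h then some h else st.2.1,
   if st.2.2.isNone && PySem.Str.isIn "futures_direction_delta" h then some h else st.2.2)

-- build the output from the final loop state, in fixed logical order
def pvBuild (st : Bool × Option String × Option String) : List (String × String) :=
  (if st.1 then [("mlf_scoreflow_total_score", "mlf_scoreflow_total_score")] else [])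
  ++ (match st.2.1 with | some h => [("vxx_vxz_ratio", h)] | none => [])
  ++ (match st.2.2 with | some h => [("futures_direction_delta", h)] | none => [])

def resolve_macro_columns_py_alt (headers : List String) : List (String × String) :=
  pvBuild (headers.foldl pvBstep (false, none, none))

-- ===== PRECONDITION & SPEC =====
def Spec_resolve_macro_columns_py (headers : List String) (out : List (String × String)) : Prop := out = resolve_macro_columns_py_alt headers
instance (headers : List String) (out : List (String × String)) : Decidable (Spec_resolve_macro_columns_py headers out) := by unfold Spec_resolve_macro_columns_py; infer_instance

-- ===== CLAIM (what is proved, stated in full; the proofs are below) =====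
def Claim_equal_resolve_macro_columns_py : Prop := ∀ (headers : List String), Dom_resolve_macro_columns_py headers → Spec_resolve_macro_columns_py headers (resolve_macro_columns_py headers)

-- ===== LEMMAS AND PROOFS =====

theorem pvFold_fst (hs : List String) (e : Bool) (v f : Option String) :
    (hs.foldl pvBstep (e, v, f)).1 = (e || hs.contains "mlf_scoreflow_total_score") := by
  induction hs generalizing e v f with
  | nil => simp
  | cons h t ih =>
    simp only [List.foldl, pvBstep, ih, List.contains_cons]
    cases e with
    | true => simp
    | false =>
      cases ht : h == "mlf_scoreflow_total_score" with
      | false =>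
        have ht' : ¬ h = "mlf_scoreflow_total_score" := by simpa using ht
        simp [eq_comm (a := "mlf_scoreflow_total_score"), ht']
      | true =>
        have ht' : h = "mlf_scoreflow_total_score" := by simpa using ht
        simp [ht']

theorem pvFold_vxx (hs : List String) (e : Bool) (v f : Option String) :
    (hs.foldl pvBstep (e, v, f)).2.1
      = v.or (hs.find? (fun h => PySem.Str.isIn "vxx_vxz_ratio" h)) := by
  induction hs generalizing e v f with
  | nil => simp
  | cons h t ih =>
    simp only [List.foldl, pvBstep, List.find?]
    cases v with
    | some x => simp [ih]
    | none =>
      cases hp : PySem.Str.isIn "vxx_vxz_ratio" h <;>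
      rw [PySem.Str.isIn_eq] at hp <;> simp [hp, ih]

theorem pvFold_fut (hs : List String) (e : Bool) (v f : Option String) :
    (hs.foldl pvBstep (e, v, f)).2.2
      = f.or (hs.find? (fun h => PySem.Str.isIn "futures_direction_delta" h)) := by
  induction hs generalizing e v f with
  | nil => simp
  | cons h t ih =>
    cases f with
    | some x => simp [pvBstep, ih]
    | none =>
      simp only [List.foldl, pvBstep, List.find?]
      cases hp : PySem.Str.isIn "futures_direction_delta" h <;>
        rw [PySem.Str.isIn_eq] at hp <;> simp [hp, ih]

theorem pvAloopVxx_eq (hs : List String) :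
    pvAloopVxx hs
      = (match hs.find? (fun h => PySem.Str.isIn "vxx_vxz_ratio" h) with
         | some h => [("vxx_vxz_ratio", h)] | none => []) := by
  induction hs with
  | nil => simp [pvAloopVxx]
  | cons h t ih =>
    simp only [pvAloopVxx, List.find?]
    cases hp : PySem.Str.isIn "vxx_vxz_ratio" h <;>
      rw [PySem.Str.isIn_eq] at hp <;> simp [hp, ih]

theorem pvAloopFut_eq (hs : List String) :
    pvAloopFut hs
      = (match hs.find? (fun h => PySem.Str.isIn "futures_direction_delta" h) with
         | some h => [("futures_direction_delta", h)] | none => []) := by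
  induction hs with
  | nil => simp [pvAloopFut]
  | cons h t ih =>
    simp only [pvAloopFut, List.find?]
    cases hp : PySem.Str.isIn "futures_direction_delta" h <;>
      rw [PySem.Str.isIn_eq] at hp <;> simp [hp, ih]

-- ===== VERDICT (by name: the statement is the Claim_ definition above) =====
theorem resolve_macro_columns_py_spec : Claim_equal_resolve_macro_columns_py := by
  intro headers _
  unfold Spec_resolve_macro_columns_py resolve_macro_columns_py resolve_macro_columns_py_alt pvBuild
  rw [pvFold_fst, pvFold_vxx, pvFold_fut, pvAloopVxx_eq, pvAloopFut_eq]
  simp
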